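-- pv_equiv track=rewrite | github.com/maati01/ASD | ćwiczenia/cwiczenia05/zad5.py | maximin
-- ===== SOURCE A (Python) =====
-- def maximin(A, k):
--     n = len(A)
--     sum_to_i = [0] * n
--     F = [[0] * (k + 1) for _ in range(n)]
--
--     temp = 0
--     for i in range(n):
--         temp += A[i]
--         sum_to_i[i] += temp
--         F[i][1] = temp
--
--     for i in range(1,n):
--         for j in range(2, k + 1):
--             if i + 1 >= j:
--                 for p in range(1, i + 1):
--                     temp_val = sum_to_i[i] - sum_to_i[i - p]
--                     temp_min = min(F[i - p][j - 1], temp_val)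
--                     if temp_min > F[i][j]:
--                         F[i][j] = temp_min
--
--     return F[n-1][k]
-- ===== SOURCE B (Python) =====
-- def maximin(A, k):
--     n = len(A)
--     if k == 1:
--         return sum(A)
--     if k > n:
--         return 0  # more segments than elements: no partition exists
--     P = [0]
--     for a in A:
--         P.append(P[-1] + a)
--
--     def feasible(x):
--         # can A be split into exactly k non-empty segments, each with sum >= x?
--         # reach[t] <-> prefix of length t splits into exactly j segments each >= x
--         reach = [t == 0 for t in range(n + 1)]
--         for _ in range(k):
--             best = None  # min prefix sum P[t] over reachable t < i
--             new = [False] * (n + 1)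
--             for i in range(n + 1):
--                 if best is not None and P[i] - best >= x:
--                     new[i] = True
--                 if reach[i] and (best is None or P[i] < best):
--                     best = P[i]
--             reach = new
--         return reach[n]
--
--     lo = 0
--     hi = sum(a for a in A if a > 0)
--     while lo < hi:
--         mid = (lo + hi + 1) // 2
--         if feasible(mid):
--             lo = mid
--         else:
--             hi = mid - 1
--     return lo
-- ===== Notes on version B (the rewrite author's own statement) =====
-- stated objective: faster
-- what changed: B replaces A's O(n^2*k) dynamic program over split points by binary search on the answer value with an O(n*k) reachability check per candidate (a rolling boolean reach-set plus a running minimum prefix sum decides whether the array splits into exactly k segments each of sum >= x).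
import Mathlib
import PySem

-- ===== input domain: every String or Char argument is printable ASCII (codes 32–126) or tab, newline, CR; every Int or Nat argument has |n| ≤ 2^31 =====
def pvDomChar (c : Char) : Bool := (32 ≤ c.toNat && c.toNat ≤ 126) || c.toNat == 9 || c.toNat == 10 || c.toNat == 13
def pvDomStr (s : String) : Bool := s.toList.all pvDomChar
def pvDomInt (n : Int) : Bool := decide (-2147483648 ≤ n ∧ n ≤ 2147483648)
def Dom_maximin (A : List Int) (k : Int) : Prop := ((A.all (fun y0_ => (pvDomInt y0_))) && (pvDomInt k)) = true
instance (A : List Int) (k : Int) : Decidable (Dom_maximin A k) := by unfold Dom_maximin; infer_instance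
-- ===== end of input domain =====

-- B replaces A's O(n^2*k) dynamic program by binary search on the answer value with a
-- linear-per-layer reachability check (objective: faster, measured on the timing inputs).

-- ===== PORT A =====
def maximin (A : List Int) (k : Int) : Int :=
  let n : Int := PySem.List.len A
  let sumToI : List Int := PySem.List.pyRepeat [(0 : Int)] n
  let F : List (List Int) :=
    (PySem.List.pyRange 0 n 1).map (fun _ => PySem.List.pyRepeat [(0 : Int)] (k + 1))
  let st :=
    (PySem.List.pyRange 0 n 1).foldl
      (fun (st : Int × List Int × List (List Int)) i =>
        let temp := st.1 + PySem.List.pyGetD A i 0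
        let sumToI := PySem.List.pySetD st.2.1 i (PySem.List.pyGetD st.2.1 i 0 + temp)
        let F := PySem.List.pySetD st.2.2 i
                   (PySem.List.pySetD (PySem.List.pyGetD st.2.2 i []) 1 temp)
        (temp, sumToI, F))
      (0, sumToI, F)
  let sumToI := st.2.1
  let F :=
    (PySem.List.pyRange 1 n 1).foldl
      (fun F i =>
        (PySem.List.pyRange 2 (k + 1) 1).foldl
          (fun F j =>
            if i + 1 ≥ j then
              (PySem.List.pyRange 1 (i + 1) 1).foldl
                (fun F p =>
                  let tempVal := PySem.List.pyGetD sumToI i 0 - PySem.List.pyGetD sumToI (i - p) 0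
                  let tempMin := min (PySem.List.pyGetD (PySem.List.pyGetD F (i - p) []) (j - 1) 0) tempVal
                  if tempMin > PySem.List.pyGetD (PySem.List.pyGetD F i []) j 0 then
                    PySem.List.pySetD F i (PySem.List.pySetD (PySem.List.pyGetD F i []) j tempMin)
                  else F)
                F
            else F)
          F)
      st.2.2
  PySem.List.pyGetD (PySem.List.pyGetD F (n - 1) []) k 0

-- ===== PORT B =====
-- feasible(x): can A (given via its prefix-sum list P, n = len(A)) be split into exactly
-- k non-empty segments, each of sum ≥ x?  (Source B's inner function 'feasible')
def pvFeasB (P : List Int) (n k x : Int) : Bool :=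
  let reach0 : List Bool := (PySem.List.pyRange 0 (n + 1) 1).map (fun t => t == 0)
  let reach :=
    (PySem.List.pyRange 0 k 1).foldl
      (fun reach _ =>
        ((PySem.List.pyRange 0 (n + 1) 1).foldl
          (fun (st : Option Int × List Bool) i =>
            let new :=
              match st.1 with
              | none => st.2
              | some b =>
                if PySem.List.pyGetD P i 0 - b ≥ x then PySem.List.pySetD st.2 i true
                else st.2
            let best :=
              if PySem.List.pyGetD reach i false then
                match st.1 with
                | none => some (PySem.List.pyGetD P i 0)
                | some b =>
                  if PySem.List.pyGetD P i 0 < b then some (PySem.List.pyGetD P i 0) else st.1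
              else st.1
            (best, new))
          (none, PySem.List.pyRepeat [false] (n + 1))).2)
      reach0
  PySem.List.pyGetD reach n false

-- midpoint bounds used by pvBsB's termination proof
lemma pvMidBounds (lo hi : Int) (h : lo < hi) :
    lo < PySem.Int.floordiv (lo + hi + 1) 2 ∧ PySem.Int.floordiv (lo + hi + 1) 2 ≤ hi := by
  rw [PySem.Int.floordiv_eq_ediv_of_pos (by norm_num)]
  omega

-- Source B's 'while lo < hi' binary-search loop
def pvBsB (P : List Int) (n k lo hi : Int) : Int :=
  if h : lo < hi then
    let mid := PySem.Int.floordiv (lo + hi + 1) 2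
    if pvFeasB P n k mid then pvBsB P n k mid hi else pvBsB P n k lo (mid - 1)
  else lo
termination_by (hi - lo).toNat
decreasing_by
  · have := pvMidBounds lo hi h; omega
  · have := pvMidBounds lo hi h; omega

def maximin_alt (A : List Int) (k : Int) : Int :=
  let n : Int := PySem.List.len A
  if k = 1 then A.sum
  else if k > n then 0
  else
    let P : List Int := A.foldl (fun P a => P ++ [PySem.List.pyGetD P (-1) 0 + a]) [0]
    let hi : Int := (A.filter (fun a => a > 0)).sum
    pvBsB P n k 0 hi

-- ===== PRECONDITION & SPEC =====
-- Pre_ excludes exactly the inputs where A raises IndexError: the empty list (F[n-1] on an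
-- empty F) and k ≤ 0 (the assignment F[i][1] on a row of length k+1 ≤ 1).
def Pre_maximin (A : List Int) (k : Int) : Prop := A ≠ [] ∧ 1 ≤ k
instance (A : List Int) (k : Int) : Decidable (Pre_maximin A k) := by unfold Pre_maximin; infer_instance
def pvWitness_maximin : List Int × Int := ([3, -1, 4, 1, 5], 3)

def Spec_maximin (A : List Int) (k : Int) (out : Int) : Prop := out = maximin_alt A k
instance (A : List Int) (k : Int) (out : Int) : Decidable (Spec_maximin A k out) := by unfold Spec_maximin; infer_instance

-- ===== CLAIM (what is proved, stated in full; the proofs are below) =====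
def Claim_equal_maximin : Prop := ∀ (A : List Int) (k : Int), Dom_maximin A k → Pre_maximin A k → Spec_maximin A k (maximin A k)

-- ===== LEMMAS AND PROOFS =====

-- prefix sum of the first t elements
def pvPref (A : List Int) (t : Nat) : Int := (A.take t).sum

-- running "max of options" accumulator
def pvOmax (acc o : Option Int) : Option Int :=
  match o with
  | none => acc
  | some c =>
    match acc with
    | none => some c
    | some b => if c > b then some c else acc

-- best min-segment-sum over partitions of A[:i+1] into exactly j segments, none if infeasible
def pvFB (A : List Int) (i j : Nat) : Option Int :=
  match j with
  | 0 => none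
  | 1 => some (pvPref A (i + 1))
  | j' + 2 =>
    (List.range i).foldl
      (fun best t =>
        pvOmax best ((pvFB A t (j' + 1)).map
          (fun pt => min pt (pvPref A (i + 1) - pvPref A (t + 1)))))
      none
termination_by j

-- spec of A's table cell F[i][j]
def pvFA (A : List Int) (i j : Nat) : Int :=
  match j with
  | 0 => 0
  | 1 => pvPref A (i + 1)
  | j' + 2 =>
    if j' + 2 ≤ i + 1 then
      (List.range i).foldl
        (fun acc p =>
          max acc (min (pvFA A (i - 1 - p) (j' + 1))
                       (pvPref A (i + 1) - pvPref A (i - 1 - p + 1))))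
        0
    else 0
termination_by j

lemma pvPref_succ (A : List Int) (m : Nat) (h : m < A.length) :
    pvPref A (m + 1) = pvPref A m + A.getD m 0 := by
  unfold pvPref
  rw [List.take_add_one, List.sum_append]
  have : A[m]? = some A[m] := List.getElem?_eq_getElem h
  simp [this, List.getD_eq_getElem?_getD]

lemma pvMapRange_set {β : Type} (f : Nat → β) (n i : Nat) (v : β) (_h : i < n) :
    ((List.range n).map f).set i v = (List.range n).map (fun t => if t = i then v else f t) := by
  apply List.ext_getElem
  · simp
  · intro t h1 h2
    simp only [List.getElem_set, List.getElem_map, List.getElem_range]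
    rcases eq_or_ne i t with ht | ht
    · simp [ht]
    · simp [ht, Ne.symm ht]

lemma pvFoldl_max_le (l : List Int) (a c : Int) (h0 : a ≤ c) (h : ∀ x ∈ l, x ≤ c) :
    l.foldl max a ≤ c := by
  induction l generalizing a with
  | nil => simpa using h0
  | cons x xs ih =>
    simp only [List.foldl_cons]
    exact ih _ (max_le h0 (h x (by simp))) (fun y hy => h y (by simp [hy]))

lemma pvOfold_none_iff (l : List (Option Int)) (acc : Option Int) :
    l.foldl pvOmax acc = none ↔ acc = none ∧ ∀ o ∈ l, o = none := by
  induction l generalizing acc with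
  | nil => simp
  | cons o xs ih =>
    cases o with
    | none =>
      rw [List.foldl_cons]
      show xs.foldl pvOmax (pvOmax acc none) = none ↔ _
      rw [show pvOmax acc none = acc from rfl, ih]
      constructor
      · rintro ⟨h1, h2⟩
        refine ⟨h1, ?_⟩
        intro o ho
        rcases List.mem_cons.mp ho with h | h
        · exact h
        · exact h2 o h
      · rintro ⟨h1, h2⟩
        exact ⟨h1, fun o ho => h2 o (List.mem_cons_of_mem _ ho)⟩
    | some c =>
      constructor
      · intro h1
        exfalso
        rw [List.foldl_cons, ih] at h1
        obtain ⟨h1, -⟩ := h1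
        cases acc with
        | none => simp [pvOmax] at h1
        | some b =>
          simp only [pvOmax] at h1
          split at h1 <;> simp at h1
      · rintro ⟨-, h2⟩
        exact absurd (h2 (some c) (by simp)) (by simp)

lemma pvOmax_le (acc o : Option Int) (b : Int) (h : acc = some b ∨ o = some b) :
    ∃ v, pvOmax acc o = some v ∧ b ≤ v := by
  cases acc with
  | none =>
    cases o with
    | none => rcases h with h | h <;> simp at h
    | some c =>
      rcases h with h | h
      · simp at h
      · simp at h
        exact ⟨c, rfl, by omega⟩
  | some a =>
    cases o with
    | none =>
      rcases h with h | h
      · simp at h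
        exact ⟨a, rfl, by omega⟩
      · simp at h
    | some c =>
      have : pvOmax (some a) (some c) = if c > a then some c else some a := rfl
      rcases h with h | h <;> simp at h <;> subst h <;> rw [this] <;> split <;>
        exact ⟨_, rfl, by omega⟩

lemma pvOfold_le (l : List (Option Int)) (acc : Option Int) (r : Int)
    (hr : l.foldl pvOmax acc = some r) :
    (∀ b, acc = some b → b ≤ r) ∧ (∀ c, some c ∈ l → c ≤ r) := by
  induction l generalizing acc with
  | nil =>
    simp only [List.foldl_nil] at hr
    refine ⟨fun b hb => ?_, fun c hc => absurd hc (by simp)⟩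
    rw [hb] at hr
    simp at hr
    omega
  | cons o xs ih =>
    rw [List.foldl_cons] at hr
    have main := ih _ hr
    refine ⟨?_, ?_⟩
    · intro b hb
      obtain ⟨v, hv, hbv⟩ := pvOmax_le acc o b (Or.inl hb)
      exact le_trans hbv (main.1 v hv)
    · intro c hc
      rcases List.mem_cons.mp hc with h | h
      · obtain ⟨v, hv, hbv⟩ := pvOmax_le acc o c (Or.inr h.symm)
        exact le_trans hbv (main.1 v hv)
      · exact main.2 c h

lemma pvOfold_mem (l : List (Option Int)) (acc : Option Int) (r : Int)
    (hr : l.foldl pvOmax acc = some r) :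
    acc = some r ∨ some r ∈ l := by
  induction l generalizing acc with
  | nil => simp only [List.foldl_nil] at hr; simp [hr]
  | cons o xs ih =>
    simp only [List.foldl_cons] at hr
    rcases ih _ hr with h | h
    · cases o with
      | none => simp [pvOmax] at h; simp [h]
      | some c =>
        cases acc with
        | none => simp [pvOmax] at h; simp [h]
        | some b =>
          simp only [pvOmax] at h
          split at h
          · simp at h; simp [h]
          · simp at h; simp [h]
    · simp [h]

-- the fold of pvOmax reaches a value ≥ x iff some element does
lemma pvOfold_ge_iff (l : List (Option Int)) (x : Int) :
    (∃ v, l.foldl pvOmax none = some v ∧ x ≤ v) ↔ ∃ c, some c ∈ l ∧ x ≤ c := by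
  constructor
  · rintro ⟨v, hv, hxv⟩
    rcases pvOfold_mem l none v hv with h | h
    · simp at h
    · exact ⟨v, h, hxv⟩
  · rintro ⟨c, hc, hxc⟩
    cases hfold : l.foldl pvOmax none with
    | none =>
      have := ((pvOfold_none_iff l none).mp hfold).2 _ hc
      simp at this
    | some r =>
      exact ⟨r, rfl, le_trans hxc ((pvOfold_le l none r hfold).2 c hc)⟩

lemma pvFB_none_iff (A : List Int) : ∀ j i, 1 ≤ j → (pvFB A i j = none ↔ i + 1 < j) := by
  intro j
  induction j using Nat.strong_induction_on with
  | _ j ih =>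
    intro i hj
    match j, hj with
    | 1, _ => simp [pvFB]
    | (j' + 2), _ =>
      rw [pvFB, ← List.foldl_map, pvOfold_none_iff]
      constructor
      · rintro ⟨-, h2⟩
        by_contra hlt
        rw [Nat.not_lt] at hlt
        have hi : 0 < i := by omega
        have ht : j' < i := by omega
        have := h2 _
          (List.mem_map_of_mem
            (f := fun t => Option.map (fun pt => min pt (pvPref A (i + 1) - pvPref A (t + 1))) (pvFB A t (j' + 1)))
            (List.mem_range.mpr ht))
        have hnone : pvFB A j' (j' + 1) = none := by
          cases hfb : pvFB A j' (j' + 1) <;> simp [hfb] at this ⊢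
        rw [ih (j' + 1) (by omega) j' (by omega)] at hnone
        omega
      · intro hlt
        refine ⟨rfl, ?_⟩
        intro o ho
        rcases List.mem_map.mp ho with ⟨t, ht, rfl⟩
        have ht' := List.mem_range.mp ht
        have : pvFB A t (j' + 1) = none := by
          rw [ih (j' + 1) (by omega) t (by omega)]
          omega
        simp [this]

-- A's clamped table cell equals B's exact value floored at 0
lemma pvFA_eq_fB (A : List Int) : ∀ j i, 2 ≤ j → pvFA A i j = max 0 ((pvFB A i j).getD 0) := by
  intro j
  induction j using Nat.strong_induction_on with
  | _ j ih =>
    intro i hj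
    match j, hj with
    | (j' + 2), _ =>
      have hsub : ∀ t, (pvFB A t (j' + 1) = none → pvFA A t (j' + 1) = 0) ∧
          (∀ pt, pvFB A t (j' + 1) = some pt →
            (pvFA A t (j' + 1) = pt ∨ (pt < 0 ∧ pvFA A t (j' + 1) = 0))) := by
        intro t
        match j' with
        | 0 =>
          refine ⟨fun h => by simp [pvFB] at h, fun pt h => ?_⟩
          have h' : pvPref A (t + 1) = pt := by simpa [pvFB] using h
          left
          simp [pvFA, h']
        | (q + 1) =>
          have hIH := ih (q + 2) (by omega) t (by omega)
          refine ⟨fun h => by rw [hIH, h]; rfl, fun pt h => ?_⟩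
          rw [hIH, h]
          simp only [Option.getD_some]
          by_cases hpt : pt < 0
          · right; exact ⟨hpt, by omega⟩
          · left; omega
      have hB : pvFB A i (j' + 2) =
          ((List.range i).map (fun t => (pvFB A t (j' + 1)).map
            (fun pt => min pt (pvPref A (i + 1) - pvPref A (t + 1))))).foldl pvOmax none := by
        rw [pvFB, ← List.foldl_map]
      have hA : pvFA A i (j' + 2) =
          if j' + 2 ≤ i + 1 then
            ((List.range i).map (fun p => min (pvFA A (i - 1 - p) (j' + 1))
              (pvPref A (i + 1) - pvPref A (i - 1 - p + 1)))).foldl max 0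
          else 0 := by
        rw [pvFA, ← List.foldl_map]
      set listB : List (Option Int) := (List.range i).map (fun t => (pvFB A t (j' + 1)).map
            (fun pt => min pt (pvPref A (i + 1) - pvPref A (t + 1)))) with hlistB
      set listA : List Int := (List.range i).map (fun p => min (pvFA A (i - 1 - p) (j' + 1))
              (pvPref A (i + 1) - pvPref A (i - 1 - p + 1))) with hlistA
      by_cases hgi : j' + 2 ≤ i + 1
      · have hi1 : 1 ≤ i := by omega
        rw [hA, if_pos hgi, hB]
        have hFA0 : (0 : Int) ≤ listA.foldl max 0 := (PySem.List.le_foldl_max listA 0).1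
        apply le_antisymm
        · apply pvFoldl_max_le _ _ _ (le_max_left _ _)
          intro x hx
          rw [hlistA] at hx
          rcases List.mem_map.mp hx with ⟨p, hp, rfl⟩
          have hpi := List.mem_range.mp hp
          set t := i - 1 - p with htdef
          cases hfb : pvFB A t (j' + 1) with
          | none =>
            rw [(hsub t).1 hfb]
            have : min (0 : Int) (pvPref A (i + 1) - pvPref A (t + 1)) ≤ 0 := min_le_left _ _
            omega
          | some pt =>
            rcases (hsub t).2 pt hfb with hEq | ⟨hneg, hEq⟩
            · rw [hEq]
              have hti : t < i := by omega
              have hmem : some (min pt (pvPref A (i + 1) - pvPref A (t + 1))) ∈ listB := by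
                rw [hlistB]
                exact List.mem_map.mpr ⟨t, List.mem_range.mpr hti, by rw [hfb]; rfl⟩
              cases hfold : listB.foldl pvOmax none with
              | none =>
                have := ((pvOfold_none_iff listB none).mp hfold).2 _ hmem
                simp at this
              | some r =>
                have hle := (pvOfold_le listB none r hfold).2 _ hmem
                calc min pt (pvPref A (i + 1) - pvPref A (t + 1)) ≤ r := hle
                  _ ≤ max 0 ((some r).getD 0) := by simp
            · rw [hEq]
              have : min (0 : Int) (pvPref A (i + 1) - pvPref A (t + 1)) ≤ 0 := min_le_left _ _
              omega
        · apply max_le hFA0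
          cases hfold : listB.foldl pvOmax none with
          | none => simpa using hFA0
          | some r =>
            simp only [Option.getD_some]
            rcases pvOfold_mem listB none r hfold with h | h
            · simp at h
            · rw [hlistB] at h
              rcases List.mem_map.mp h with ⟨t, htmem, hterm⟩
              have hti := List.mem_range.mp htmem
              cases hfb : pvFB A t (j' + 1) with
              | none => rw [hfb] at hterm; simp at hterm
              | some pt =>
                rw [hfb] at hterm
                simp only [Option.map_some, Option.some.injEq] at hterm
                by_cases hr0 : 0 < r
                case neg => omega
                · have hptpos : 0 < pt := by
                    have : min pt (pvPref A (i + 1) - pvPref A (t + 1)) ≤ pt := min_le_left _ _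
                    omega
                  rcases (hsub t).2 pt hfb with hEq | ⟨hneg, -⟩
                  · have hidx : i - 1 - (i - 1 - t) = t := by omega
                    have hmemA : min (pvFA A (i - 1 - (i - 1 - t)) (j' + 1))
                        (pvPref A (i + 1) - pvPref A (i - 1 - (i - 1 - t) + 1)) ∈ listA := by
                      rw [hlistA]
                      exact List.mem_map.mpr ⟨i - 1 - t, List.mem_range.mpr (by omega), rfl⟩
                    rw [hidx, hEq, hterm] at hmemA
                    exact (PySem.List.le_foldl_max listA 0).2 r hmemA
                  · omega
      · rw [hA, if_neg hgi,
          (pvFB_none_iff A (j' + 2) i (by omega)).mpr (by omega)]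
        rfl

-- ---- the prefix-sum list built by B's first loop ----

lemma pvPfold : ∀ (xs L : List Int) (s : Int), L.getLast? = some s →
    xs.foldl (fun P x => P ++ [PySem.List.pyGetD P (-1) 0 + x]) L
      = L ++ (List.range xs.length).map (fun t => s + pvPref xs (t + 1)) := by
  intro xs
  induction xs with
  | nil => intro L s _; simp
  | cons x xs ih =>
    intro L s hL
    have hne : L ≠ [] := by intro h; rw [h] at hL; simp at hL
    have hget : PySem.List.pyGetD L (-1) 0 = s := by
      rw [PySem.List.pyGetD_neg_one L 0 hne]
      rw [List.getLast?_eq_some_getLast hne] at hL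
      exact (Option.some.injEq _ _).mp hL
    rw [List.foldl_cons, hget, ih (L ++ [s + x]) (s + x) (by simp)]
    rw [List.append_assoc]
    congr 1
    rw [List.length_cons, List.range_succ_eq_map]
    simp only [List.map_cons, List.map_map]
    rw [List.singleton_append]
    congr 1
    · simp [pvPref]
    · apply List.map_congr_left
      intro t _
      simp only [Function.comp_apply, Nat.succ_eq_add_one, pvPref, List.take_succ_cons,
        List.sum_cons]
      ring

lemma pvPlist (A : List Int) :
    A.foldl (fun P x => P ++ [PySem.List.pyGetD P (-1) 0 + x]) [0]
      = (List.range (A.length + 1)).map (pvPref A) := by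
  rw [pvPfold A [0] 0 rfl]
  rw [List.range_succ_eq_map]
  simp only [List.map_cons, List.map_map, List.singleton_append]
  congr 1
  apply List.map_congr_left
  intro t _
  simp [Nat.succ_eq_add_one]


-- ---- B-side: reach-layer characterisation ----

-- spec of one reach cell: prefix of length i splits into exactly j segments each of sum ≥ x
def pvReach (A : List Int) (x : Int) (j i : Nat) : Bool :=
  match i with
  | 0 => j == 0
  | i' + 1 =>
    match pvFB A i' j with
    | none => false
    | some v => decide (x ≤ v)

-- running minimum of two candidates, as an Option (B's 'best' update)
def pvMinO (o : Option Int) (v : Int) : Option Int :=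
  match o with
  | none => some v
  | some b => if v < b then some v else some b

-- running minimum of P over reach-marked indices below m (B's 'best' accumulator)
def pvBest (P : Nat → Int) (R : Nat → Bool) : Nat → Option Int
  | 0 => none
  | m + 1 =>
    if R m then pvMinO (pvBest P R m) (P m) else pvBest P R m

-- the new-cell value B writes at index i
def pvNewB (P : Nat → Int) (R : Nat → Bool) (x : Int) (i : Nat) : Bool :=
  match pvBest P R i with
  | none => false
  | some b => decide (x ≤ P i - b)

lemma pvBest_none_iff (P : Nat → Int) (R : Nat → Bool) (m : Nat) :
    pvBest P R m = none ↔ ∀ t, t < m → R t = false := by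
  induction m with
  | zero => simp [pvBest]
  | succ m ih =>
    rw [pvBest]
    by_cases hR : R m = true
    · rw [if_pos hR]
      constructor
      · intro h
        exfalso
        cases hprev : pvBest P R m with
        | none => rw [hprev] at h; simp [pvMinO] at h
        | some b' =>
          rw [hprev] at h
          by_cases hc : P m < b'
          · simp [pvMinO, if_pos hc] at h
          · simp [pvMinO, if_neg hc] at h
      · intro h
        exact absurd (h m (by omega)) (by simp [hR])
    · rw [if_neg hR, ih]
      constructor
      · intro h t ht
        rcases Nat.lt_succ_iff_lt_or_eq.mp ht with h' | h'
        · exact h t h'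
        · subst h'
          simpa using hR
      · intro h t ht
        exact h t (by omega)

lemma pvBest_le (P : Nat → Int) (R : Nat → Bool) (m : Nat) (b : Int)
    (hb : pvBest P R m = some b) : ∀ t, t < m → R t = true → b ≤ P t := by
  induction m generalizing b with
  | zero => simp [pvBest] at hb
  | succ m ih =>
    rw [pvBest] at hb
    intro t ht hRt
    by_cases hR : R m = true
    · rw [if_pos hR] at hb
      cases hprev : pvBest P R m with
      | none =>
        rw [hprev] at hb
        simp only [pvMinO, Option.some.injEq] at hb
        rw [pvBest_none_iff] at hprev
        rcases Nat.lt_succ_iff_lt_or_eq.mp ht with ht' | ht'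
        · exact absurd (hprev t ht') (by simp [hRt])
        · subst ht'
          omega
      | some b' =>
        rw [hprev] at hb
        rcases Nat.lt_succ_iff_lt_or_eq.mp ht with ht' | ht'
        · have := ih b' hprev t ht' hRt
          by_cases hc : P m < b'
          · simp only [pvMinO, if_pos hc, Option.some.injEq] at hb
            omega
          · simp only [pvMinO, if_neg hc, Option.some.injEq] at hb
            omega
        · subst ht'
          by_cases hc : P t < b'
          · simp only [pvMinO, if_pos hc, Option.some.injEq] at hb
            omega
          · simp only [pvMinO, if_neg hc, Option.some.injEq] at hb
            omega
    · rw [if_neg hR] at hb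
      rcases Nat.lt_succ_iff_lt_or_eq.mp ht with ht' | ht'
      · exact ih b hb t ht' hRt
      · subst ht'
        exact absurd hRt (by simpa using hR)

lemma pvBest_mem (P : Nat → Int) (R : Nat → Bool) (m : Nat) (b : Int)
    (hb : pvBest P R m = some b) : ∃ t, t < m ∧ R t = true ∧ P t = b := by
  induction m generalizing b with
  | zero => simp [pvBest] at hb
  | succ m ih =>
    rw [pvBest] at hb
    by_cases hR : R m = true
    · rw [if_pos hR] at hb
      cases hprev : pvBest P R m with
      | none =>
        rw [hprev] at hb
        simp only [pvMinO, Option.some.injEq] at hb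
        exact ⟨m, by omega, hR, hb⟩
      | some b' =>
        rw [hprev] at hb
        by_cases hc : P m < b'
        · simp only [pvMinO, if_pos hc, Option.some.injEq] at hb
          exact ⟨m, by omega, hR, hb⟩
        · simp only [pvMinO, if_neg hc, Option.some.injEq] at hb
          obtain ⟨t, ht, hRt, hPt⟩ := ih b' hprev
          exact ⟨t, by omega, hRt, by omega⟩
    · rw [if_neg hR] at hb
      obtain ⟨t, ht, hRt, hPt⟩ := ih b hb
      exact ⟨t, by omega, hRt, hPt⟩

lemma pvNewB_iff (P : Nat → Int) (R : Nat → Bool) (x : Int) (i : Nat) :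
    pvNewB P R x i = true ↔ ∃ t, t < i ∧ R t = true ∧ x ≤ P i - P t := by
  unfold pvNewB
  cases hb : pvBest P R i with
  | none =>
    constructor
    · intro h
      exact absurd h (by simp)
    · rintro ⟨t, ht, hRt, -⟩
      rw [pvBest_none_iff] at hb
      exact absurd (hb t ht) (by simp [hRt])
  | some b =>
    simp only [decide_eq_true_eq]
    constructor
    · intro h
      obtain ⟨t, ht, hRt, hPt⟩ := pvBest_mem P R i b hb
      exact ⟨t, ht, hRt, by omega⟩
    · rintro ⟨t, ht, hRt, hx⟩
      have := pvBest_le P R i b hb t ht hRt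
      omega

-- one reach-layer step, at the spec level
lemma pvReach_succ (A : List Int) (x : Int) (j i' : Nat) :
    (pvReach A x (j + 1) (i' + 1) = true ↔
      ∃ t, t < i' + 1 ∧ pvReach A x j t = true ∧ x ≤ pvPref A (i' + 1) - pvPref A t) := by
  cases j with
  | zero =>
    show ((match pvFB A i' 1 with | none => false | some v => decide (x ≤ v)) = true) ↔ _
    rw [show pvFB A i' 1 = some (pvPref A (i' + 1)) by simp [pvFB]]
    simp only [decide_eq_true_eq]
    constructor
    · intro h
      refine ⟨0, by omega, rfl, ?_⟩
      simp only [pvPref, List.take_zero, List.sum_nil]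
      simp only [pvPref] at *
      omega
    · rintro ⟨t, ht, hRt, hx⟩
      match t, hRt with
      | 0, _ =>
        simp only [pvPref] at hx ⊢
        simp only [List.take_zero, List.sum_nil] at hx
        omega
      | (t' + 1), hRt =>
        exfalso
        have : pvReach A x 0 (t' + 1) = false := by
          show (match pvFB A t' 0 with | none => false | some v => decide (x ≤ v)) = false
          rw [show pvFB A t' 0 = none by simp [pvFB]]
        simp [this] at hRt
  | succ j'' =>
    show ((match pvFB A i' (j'' + 2) with | none => false | some v => decide (x ≤ v)) = true) ↔ _
    have hfold : pvFB A i' (j'' + 2) =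
        ((List.range i').map (fun t => (pvFB A t (j'' + 1)).map
          (fun pt => min pt (pvPref A (i' + 1) - pvPref A (t + 1))))).foldl pvOmax none := by
      rw [pvFB, ← List.foldl_map]
    have hmain : (∃ v, pvFB A i' (j'' + 2) = some v ∧ x ≤ v) ↔
        ∃ c, some c ∈ ((List.range i').map (fun t => (pvFB A t (j'' + 1)).map
          (fun pt => min pt (pvPref A (i' + 1) - pvPref A (t + 1))))) ∧ x ≤ c := by
      rw [hfold]
      exact pvOfold_ge_iff _ x
    constructor
    · intro h
      cases hfb : pvFB A i' (j'' + 2) with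
      | none => rw [hfb] at h; simp at h
      | some v =>
        rw [hfb] at h
        simp only [decide_eq_true_eq] at h
        obtain ⟨c, hc, hxc⟩ := hmain.mp ⟨v, hfb, h⟩
        rcases List.mem_map.mp hc with ⟨t, htmem, hterm⟩
        have ht := List.mem_range.mp htmem
        cases hw : pvFB A t (j'' + 1) with
        | none => rw [hw] at hterm; simp at hterm
        | some w =>
          rw [hw] at hterm
          simp only [Option.map_some, Option.some.injEq] at hterm
          refine ⟨t + 1, by omega, ?_, ?_⟩
          · show (match pvFB A t (j'' + 1) with | none => false | some v => decide (x ≤ v)) = true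
            rw [hw]
            simp only [decide_eq_true_eq]
            omega
          · omega
    · rintro ⟨t, ht, hRt, hx⟩
      match t, hRt with
      | 0, hRt =>
        exfalso
        have : pvReach A x (j'' + 1) 0 = false := by
          show ((j'' + 1 : Nat) == 0) = false
          simp
        simp [this] at hRt
      | (t' + 1), hRt =>
        have hw : ∃ w, pvFB A t' (j'' + 1) = some w ∧ x ≤ w := by
          revert hRt
          show (match pvFB A t' (j'' + 1) with | none => false | some v => decide (x ≤ v)) = true → _
          cases hfb : pvFB A t' (j'' + 1) with
          | none => intro h; simp at h
          | some w =>
            intro h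
            simp only [decide_eq_true_eq] at h
            exact ⟨w, rfl, h⟩
        obtain ⟨w, hwfb, hxw⟩ := hw
        have : ∃ c, some c ∈ ((List.range i').map (fun t => (pvFB A t (j'' + 1)).map
            (fun pt => min pt (pvPref A (i' + 1) - pvPref A (t + 1))))) ∧ x ≤ c := by
          refine ⟨min w (pvPref A (i' + 1) - pvPref A (t' + 1)), ?_, by omega⟩
          exact List.mem_map.mpr ⟨t', List.mem_range.mpr (by omega), by rw [hwfb]; rfl⟩
        obtain ⟨v, hfb, hxv⟩ := hmain.mpr this
        rw [hfb]
        simpa using hxv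


lemma pvMinO_eq (o : Option Int) (v : Int) :
    (match o with
     | none => some v
     | some b => if v < b then some v else o) = pvMinO o v := by
  cases o with
  | none => rfl
  | some b => rfl

lemma pvNewB_eq_reach (A : List Int) (x : Int) (j i : Nat) :
    pvNewB (pvPref A) (pvReach A x j) x i = pvReach A x (j + 1) i := by
  cases i with
  | zero =>
    show pvNewB (pvPref A) (pvReach A x j) x 0 = pvReach A x (j + 1) 0
    simp [pvNewB, pvBest, pvReach]
  | succ i' =>
    have h : (pvNewB (pvPref A) (pvReach A x j) x (i' + 1) = true) ↔
        (pvReach A x (j + 1) (i' + 1) = true) :=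
      (pvNewB_iff (pvPref A) (pvReach A x j) x (i' + 1)).trans (pvReach_succ A x j i').symm
    exact Bool.eq_iff_iff.mpr h

-- B's inner scan over i = 0..N-1, at the Nat level
lemma pvInner (Pf : Nat → Int) (R : Nat → Bool) (x : Int) (N : Nat) :
    ∀ m, m ≤ N →
    (List.range m).foldl
      (fun (st : Option Int × List Bool) (i : Nat) =>
        let new :=
          match st.1 with
          | none => st.2
          | some b => if Pf i - b ≥ x then st.2.set i true else st.2
        let best :=
          if R i then
            match st.1 with
            | none => some (Pf i)
            | some b => if Pf i < b then some (Pf i) else st.1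
          else st.1
        (best, new))
      (none, List.replicate N false)
    = (pvBest Pf R m, (List.range N).map (fun i => decide (i < m) && pvNewB Pf R x i)) := by
  intro m
  induction m with
  | zero =>
    intro _
    simp only [List.range_zero, List.foldl_nil]
    refine Prod.ext rfl ?_
    show List.replicate N false = _
    apply List.ext_getElem
    · simp
    · intro t h1 h2
      simp
  | succ m ih =>
    intro hm
    have hmN : m < N := by omega
    rw [List.range_succ, List.foldl_append, ih (by omega), List.foldl_cons, List.foldl_nil]
    refine Prod.ext ?_ ?_
    · show (if R m then
          match pvBest Pf R m with
          | none => some (Pf m)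
          | some b => if Pf m < b then some (Pf m) else pvBest Pf R m
        else pvBest Pf R m) = pvBest Pf R (m + 1)
      rw [pvMinO_eq, pvBest]
    · cases hb : pvBest Pf R m with
      | none =>
        show (List.range N).map (fun i => decide (i < m) && pvNewB Pf R x i)
            = (List.range N).map (fun i => decide (i < m + 1) && pvNewB Pf R x i)
        have hnew : pvNewB Pf R x m = false := by
          simp [pvNewB, hb]
        apply List.map_congr_left
        intro i hi
        rcases eq_or_ne i m with h | h
        · subst h
          simp [hnew]
        · rw [show decide (i < m) = decide (i < m + 1) from decide_eq_decide.mpr (by omega)]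
      | some b =>
        show (if Pf m - b ≥ x then
              ((List.range N).map (fun i => decide (i < m) && pvNewB Pf R x i)).set m true
            else (List.range N).map (fun i => decide (i < m) && pvNewB Pf R x i))
            = (List.range N).map (fun i => decide (i < m + 1) && pvNewB Pf R x i)
        by_cases hx : Pf m - b ≥ x
        · rw [if_pos hx]
          have hnew : pvNewB Pf R x m = true := by
            simp only [pvNewB, hb, decide_eq_true_eq]
            omega
          rw [pvMapRange_set _ _ _ _ hmN]
          apply List.map_congr_left
          intro i hi
          rcases eq_or_ne i m with h | h
          · subst h
            simp [hnew]
          · rw [if_neg h,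
              show decide (i < m) = decide (i < m + 1) from decide_eq_decide.mpr (by omega)]
        · rw [if_neg hx]
          have hnew : pvNewB Pf R x m = false := by
            simp only [pvNewB, hb]
            simp only [decide_eq_false_iff_not]
            omega
          apply List.map_congr_left
          intro i hi
          rcases eq_or_ne i m with h | h
          · subst h
            simp [hnew]
          · rw [show decide (i < m) = decide (i < m + 1) from decide_eq_decide.mpr (by omega)]

-- one round of B's reach update, at the port level
lemma pvRound (A : List Int) (x : Int) (j : Nat) :
    ((PySem.List.pyRange 0 ((A.length : Int) + 1) 1).foldl
      (fun (st : Option Int × List Bool) i =>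
        let new :=
          match st.1 with
          | none => st.2
          | some b =>
            if PySem.List.pyGetD ((List.range (A.length + 1)).map (pvPref A)) i 0 - b ≥ x then
              PySem.List.pySetD st.2 i true
            else st.2
        let best :=
          if PySem.List.pyGetD ((List.range (A.length + 1)).map (pvReach A x j)) i false then
            match st.1 with
            | none => some (PySem.List.pyGetD ((List.range (A.length + 1)).map (pvPref A)) i 0)
            | some b =>
              if PySem.List.pyGetD ((List.range (A.length + 1)).map (pvPref A)) i 0 < b then
                some (PySem.List.pyGetD ((List.range (A.length + 1)).map (pvPref A)) i 0)
              else st.1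
          else st.1
        (best, new))
      (none, PySem.List.pyRepeat [false] ((A.length : Int) + 1))).2
    = (List.range (A.length + 1)).map (pvReach A x (j + 1)) := by
  have hcastN : ((A.length : Int) + 1) = ((A.length + 1 : ℕ) : Int) := by push_cast; ring
  rw [hcastN, PySem.List.pyRepeat_singleton, Int.toNat_natCast, PySem.List.pyRange_zero_nat,
    List.foldl_map]
  have hconv :
      (List.range (A.length + 1)).foldl
        (fun (st : Option Int × List Bool) (i : Nat) =>
          let new :=
            match st.1 with
            | none => st.2
            | some b =>
              if PySem.List.pyGetD ((List.range (A.length + 1)).map (pvPref A)) (i : Int) 0 - b ≥ x then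
                PySem.List.pySetD st.2 (i : Int) true
              else st.2
          let best :=
            if PySem.List.pyGetD ((List.range (A.length + 1)).map (pvReach A x j)) (i : Int) false then
              match st.1 with
              | none => some (PySem.List.pyGetD ((List.range (A.length + 1)).map (pvPref A)) (i : Int) 0)
              | some b =>
                if PySem.List.pyGetD ((List.range (A.length + 1)).map (pvPref A)) (i : Int) 0 < b then
                  some (PySem.List.pyGetD ((List.range (A.length + 1)).map (pvPref A)) (i : Int) 0)
                else st.1
            else st.1
          (best, new))
        (none, List.replicate (A.length + 1) false)
      = (List.range (A.length + 1)).foldl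
        (fun (st : Option Int × List Bool) (i : Nat) =>
          let new :=
            match st.1 with
            | none => st.2
            | some b => if pvPref A i - b ≥ x then st.2.set i true else st.2
          let best :=
            if pvReach A x j i then
              match st.1 with
              | none => some (pvPref A i)
              | some b => if pvPref A i < b then some (pvPref A i) else st.1
            else st.1
          (best, new))
        (none, List.replicate (A.length + 1) false) := by
    apply PySem.List.foldl_congr_mem
    intro st i hi
    have hiN : i < A.length + 1 := List.mem_range.mp hi
    have eP : PySem.List.pyGetD ((List.range (A.length + 1)).map (pvPref A)) (i : Int) 0
        = pvPref A i := by
      rw [PySem.List.pyGetD_natCast, PySem.List.getD_map_range _ _ _ _ hiN]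
    have eR : PySem.List.pyGetD ((List.range (A.length + 1)).map (pvReach A x j)) (i : Int) false
        = pvReach A x j i := by
      rw [PySem.List.pyGetD_natCast, PySem.List.getD_map_range _ _ _ _ hiN]
    simp only [eP, eR, PySem.List.pySetD_natCast]
  rw [hconv, pvInner (pvPref A) (pvReach A x j) x (A.length + 1) (A.length + 1) le_rfl]
  apply List.map_congr_left
  intro i hi
  have hiN := List.mem_range.mp hi
  rw [decide_eq_true hiN, Bool.true_and, pvNewB_eq_reach]

-- the initial reach row is the j = 0 spec row
lemma pvReach0 (A : List Int) (x : Int) :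
    (PySem.List.pyRange 0 ((A.length : Int) + 1) 1).map (fun t => t == 0)
      = (List.range (A.length + 1)).map (pvReach A x 0) := by
  have hcastN : ((A.length : Int) + 1) = ((A.length + 1 : ℕ) : Int) := by push_cast; ring
  rw [hcastN, PySem.List.pyRange_zero_nat, List.map_map]
  apply List.map_congr_left
  intro t _
  cases t with
  | zero => rfl
  | succ t' =>
    show (((t' + 1 : ℕ) : Int) == 0) = pvReach A x 0 (t' + 1)
    have h1 : (((t' + 1 : ℕ) : Int) == 0) = false := by
      simp
      omega
    have h2 : pvReach A x 0 (t' + 1) = false := by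
      show (match pvFB A t' 0 with | none => false | some v => decide (x ≤ v)) = false
      rw [show pvFB A t' 0 = none by simp [pvFB]]
    rw [h1, h2]

-- pvFeasB on A's prefix sums computes the k-th reach row at index n
lemma pvFeas_char (A : List Int) (k x : Int) (hk : 0 ≤ k) :
    pvFeasB ((List.range (A.length + 1)).map (pvPref A)) (A.length : Int) k x
      = pvReach A x k.toNat A.length := by
  simp only [pvFeasB]
  rw [pvReach0 A x]
  have hrounds : ∀ r : Nat,
      (PySem.List.pyRange 0 ((r : ℕ) : Int) 1).foldl
        (fun reach _ =>
          ((PySem.List.pyRange 0 ((A.length : Int) + 1) 1).foldl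
            (fun (st : Option Int × List Bool) i =>
              let new :=
                match st.1 with
                | none => st.2
                | some b =>
                  if PySem.List.pyGetD ((List.range (A.length + 1)).map (pvPref A)) i 0 - b ≥ x then
                    PySem.List.pySetD st.2 i true
                  else st.2
              let best :=
                if PySem.List.pyGetD reach i false then
                  match st.1 with
                  | none => some (PySem.List.pyGetD ((List.range (A.length + 1)).map (pvPref A)) i 0)
                  | some b =>
                    if PySem.List.pyGetD ((List.range (A.length + 1)).map (pvPref A)) i 0 < b then
                      some (PySem.List.pyGetD ((List.range (A.length + 1)).map (pvPref A)) i 0)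
                    else st.1
                else st.1
              (best, new))
            (none, PySem.List.pyRepeat [false] ((A.length : Int) + 1))).2)
        ((List.range (A.length + 1)).map (pvReach A x 0))
      = (List.range (A.length + 1)).map (pvReach A x r) := by
    intro r
    induction r with
    | zero =>
      rw [show ((0 : ℕ) : Int) = 0 from rfl, PySem.List.pyRange_zero]
      rfl
    | succ r ihr =>
      rw [PySem.List.pyRange_zero_nat, List.foldl_map] at ihr ⊢
      rw [List.range_succ (n := r), List.foldl_append, ihr, List.foldl_cons, List.foldl_nil]
      exact pvRound A x r
  rw [show k = ((k.toNat : ℕ) : Int) by omega, hrounds k.toNat]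
  rw [PySem.List.pyGetD_natCast, PySem.List.getD_map_range _ _ _ _ (by omega : A.length < A.length + 1)]
  rw [Int.toNat_natCast]


-- ---- port A computes pvFA ----

-- row i of A's table right after the first loop
def pvRow0 (A : List Int) (K r : ℕ) : List Int :=
  (List.replicate (K + 1) 0).set 1 (pvPref A (r + 1))

-- row i of A's table with columns up to q computed (columns beyond q still 0)
def pvRowMid (A : List Int) (K r q : ℕ) : List Int :=
  (List.range (K + 1)).map (fun j => if j ≤ q then pvFA A r j else 0)

-- fully computed row
def pvRowFin (A : List Int) (K r : ℕ) : List Int :=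
  (List.range (K + 1)).map (fun j => pvFA A r j)

lemma pvFA_zero_eq (A : List Int) (j : ℕ) (hj : 2 ≤ j) : pvFA A 0 j = 0 := by
  match j, hj with
  | (j' + 2), _ => simp [pvFA]

lemma pvRow0_eq (A : List Int) (K r : ℕ) (_hK : 1 ≤ K) :
    pvRow0 A K r = pvRowMid A K r 1 := by
  apply List.ext_getElem
  · simp [pvRow0, pvRowMid]
  · intro j h1 h2
    simp only [pvRow0, pvRowMid, List.getElem_set, List.getElem_replicate, List.getElem_map,
      List.getElem_range]
    match j with
    | 0 => simp [pvFA]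
    | 1 => simp [pvFA]
    | (j' + 2) => simp

lemma pvRowMid_last (A : List Int) (K r : ℕ) :
    pvRowMid A K r K = pvRowFin A K r := by
  apply List.map_congr_left
  intro j hj
  have hjK := List.mem_range.mp hj
  rw [if_pos (by omega : j ≤ K)]

lemma pvRowFin_zero (A : List Int) (K : ℕ) (hK : 1 ≤ K) :
    pvRowFin A K 0 = pvRow0 A K 0 := by
  rw [pvRow0_eq A K 0 hK]
  apply List.map_congr_left
  intro j hj
  match j with
  | 0 => simp
  | 1 => simp
  | (j' + 2) =>
    rw [pvFA_zero_eq A (j' + 2) (by omega)]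
    simp

lemma pvPhase1 (A : List Int) (k : Int) (_hk : 1 ≤ k) :
    ∀ m, m ≤ A.length →
    (List.range m).foldl
      (fun (st : Int × List Int × List (List Int)) (i : ℕ) =>
        let temp := st.1 + PySem.List.pyGetD A (i : Int) 0
        let sumToI := PySem.List.pySetD st.2.1 (i : Int) (PySem.List.pyGetD st.2.1 (i : Int) 0 + temp)
        let F := PySem.List.pySetD st.2.2 (i : Int)
                   (PySem.List.pySetD (PySem.List.pyGetD st.2.2 (i : Int) []) 1 temp)
        (temp, sumToI, F))
      (0, List.replicate A.length 0, (List.range A.length).map (fun _ => List.replicate (k.toNat + 1) 0))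
    = (pvPref A m,
       (List.range A.length).map (fun r => if r < m then pvPref A (r + 1) else 0),
       (List.range A.length).map (fun r => if r < m then pvRow0 A k.toNat r else List.replicate (k.toNat + 1) 0)) := by
  intro m
  induction m with
  | zero =>
    intro _
    simp only [List.range_zero, List.foldl_nil]
    refine Prod.ext (by simp [pvPref]) (Prod.ext ?_ ?_)
    · show List.replicate A.length 0 = _
      apply List.ext_getElem
      · simp
      · intro r h1 h2
        simp
    · simp
  | succ m ih =>
    intro hm
    have hmN : m < A.length := by omega
    rw [List.range_succ, List.foldl_append, ih (by omega), List.foldl_cons, List.foldl_nil]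
    simp only [PySem.List.pyGetD_natCast, PySem.List.pySetD_natCast]
    have htemp : pvPref A m + A.getD m 0 = pvPref A (m + 1) := (pvPref_succ A m hmN).symm
    have htemp' : pvPref A m + A[m]?.getD 0 = pvPref A (m + 1) := by
      rw [← List.getD_eq_getElem?_getD]
      exact htemp
    refine Prod.ext (by simpa using htemp) (Prod.ext ?_ ?_)
    · show (((List.range A.length).map fun r => if r < m then pvPref A (r + 1) else 0).set m
        ((((List.range A.length).map fun r => if r < m then pvPref A (r + 1) else 0).getD m 0) +
          (pvPref A m + A.getD m 0))) = _
      rw [PySem.List.getD_map_range _ _ _ _ hmN, pvMapRange_set _ _ _ _ hmN]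
      apply List.map_congr_left
      intro r hr
      rcases eq_or_ne r m with h | h
      · simp [h, htemp']
      · have : (r < m) = (r < m + 1) := by
          apply propext
          omega
        simp [h, this]
    · show (((List.range A.length).map fun r => if r < m then pvRow0 A k.toNat r else List.replicate (k.toNat + 1) 0).set m
        (PySem.List.pySetD
          (((List.range A.length).map fun r => if r < m then pvRow0 A k.toNat r else List.replicate (k.toNat + 1) 0).getD m [])
          1 (pvPref A m + A.getD m 0))) = _
      rw [PySem.List.getD_map_range _ _ _ _ hmN, pvMapRange_set _ _ _ _ hmN]
      apply List.map_congr_left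
      intro r hr
      rcases eq_or_ne r m with h | h
      · subst h
        simp only [lt_irrefl, if_false]
        rw [show ((1 : Int)) = ((1 : ℕ) : Int) from rfl, PySem.List.pySetD_natCast]
        simp [pvRow0, htemp']
      · have : (r < m) = (r < m + 1) := by
          apply propext
          omega
        simp [h, this]

lemma pvFA_eq_zero_of_guard (A : List Int) (i j : ℕ) (hj : 2 ≤ j) (hg : ¬ j ≤ i + 1) :
    pvFA A i j = 0 := by
  match j, hj with
  | (j' + 2), _ => rw [pvFA, if_neg (by omega : ¬ j' + 2 ≤ i + 1)]

-- A's inner p-loop fills cell (i, q+2) with the running maximum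
lemma pvPfoldA (A : List Int) (K i q : ℕ)
    (hq2 : q + 2 ≤ K) (hi1 : 1 ≤ i) (hiN : i < A.length) :
    ∀ s, s ≤ i →
    (List.range s).foldl
      (fun F (p : ℕ) =>
        let tempVal := PySem.List.pyGetD ((List.range A.length).map (fun r => pvPref A (r + 1))) (i : Int) 0
          - PySem.List.pyGetD ((List.range A.length).map (fun r => pvPref A (r + 1))) ((i : Int) - (1 + (p : Int))) 0
        let tempMin := min (PySem.List.pyGetD (PySem.List.pyGetD F ((i : Int) - (1 + (p : Int))) []) ((2 + (q : Int)) - 1) 0) tempVal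
        if tempMin > PySem.List.pyGetD (PySem.List.pyGetD F (i : Int) []) (2 + (q : Int)) 0 then
          PySem.List.pySetD F (i : Int) (PySem.List.pySetD (PySem.List.pyGetD F (i : Int) []) (2 + (q : Int)) tempMin)
        else F)
      ((List.range A.length).map (fun r => if r < i then pvRowFin A K r
        else if r = i then
          (List.range (K + 1)).map (fun jj => if jj = q + 2 then 0
            else if jj ≤ q + 1 then pvFA A i jj else 0)
        else pvRow0 A K r))
    = (List.range A.length).map (fun r => if r < i then pvRowFin A K r
        else if r = i then
          (List.range (K + 1)).map (fun jj => if jj = q + 2 then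
            (List.range s).foldl (fun acc p => max acc (min (pvFA A (i - 1 - p) (q + 1))
              (pvPref A (i + 1) - pvPref A (i - 1 - p + 1)))) 0
            else if jj ≤ q + 1 then pvFA A i jj else 0)
        else pvRow0 A K r) := by
  intro s
  induction s with
  | zero => intro _; simp
  | succ s ihs =>
    intro hs
    rw [List.range_succ (n := s), List.foldl_append, ihs (by omega), List.foldl_cons, List.foldl_nil]
    set t := i - 1 - s with htdef
    have htN : t < A.length := by omega
    have hti : t < i := by omega
    have hcast : ((i : Int) - (1 + (s : Int))) = ((t : ℕ) : Int) := by omega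
    have hcol1 : ((q + 2 : ℕ) : Int) - 1 = ((q + 1 : ℕ) : Int) := by push_cast; ring
    have hcol2 : ((2 : Int) + (q : Int)) = ((q + 2 : ℕ) : Int) := by push_cast; ring
    have eSi : ((List.range A.length).map (fun r => pvPref A (r + 1))).getD i 0 = pvPref A (i + 1) :=
      PySem.List.getD_map_range _ _ _ _ hiN
    have eSt : ((List.range A.length).map (fun r => pvPref A (r + 1))).getD t 0 = pvPref A (t + 1) :=
      PySem.List.getD_map_range _ _ _ _ htN
    have eFt : ((List.range A.length).map (fun r => if r < i then pvRowFin A K r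
        else if r = i then
          (List.range (K + 1)).map (fun jj => if jj = q + 2 then
            (List.range s).foldl (fun acc p => max acc (min (pvFA A (i - 1 - p) (q + 1))
              (pvPref A (i + 1) - pvPref A (i - 1 - p + 1)))) 0
            else if jj ≤ q + 1 then pvFA A i jj else 0)
        else pvRow0 A K r)).getD t [] = pvRowFin A K t := by
      rw [PySem.List.getD_map_range _ _ _ _ htN, if_pos hti]
    have eFi : ((List.range A.length).map (fun r => if r < i then pvRowFin A K r
        else if r = i then
          (List.range (K + 1)).map (fun jj => if jj = q + 2 then
            (List.range s).foldl (fun acc p => max acc (min (pvFA A (i - 1 - p) (q + 1))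
              (pvPref A (i + 1) - pvPref A (i - 1 - p + 1)))) 0
            else if jj ≤ q + 1 then pvFA A i jj else 0)
        else pvRow0 A K r)).getD i [] =
        (List.range (K + 1)).map (fun jj => if jj = q + 2 then
            (List.range s).foldl (fun acc p => max acc (min (pvFA A (i - 1 - p) (q + 1))
              (pvPref A (i + 1) - pvPref A (i - 1 - p + 1)))) 0
            else if jj ≤ q + 1 then pvFA A i jj else 0) := by
      rw [PySem.List.getD_map_range _ _ _ _ hiN, if_neg (lt_irrefl i), if_pos rfl]
    have eRowT : (pvRowFin A K t).getD (q + 1) 0 = pvFA A t (q + 1) := by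
      rw [pvRowFin, PySem.List.getD_map_range _ _ _ _ (by omega : q + 1 < K + 1)]
    have eCell : ((List.range (K + 1)).map (fun jj => if jj = q + 2 then
            (List.range s).foldl (fun acc p => max acc (min (pvFA A (i - 1 - p) (q + 1))
              (pvPref A (i + 1) - pvPref A (i - 1 - p + 1)))) 0
            else if jj ≤ q + 1 then pvFA A i jj else 0)).getD (q + 2) 0 =
        (List.range s).foldl (fun acc p => max acc (min (pvFA A (i - 1 - p) (q + 1))
              (pvPref A (i + 1) - pvPref A (i - 1 - p + 1)))) 0 := by
      rw [PySem.List.getD_map_range _ _ _ _ (by omega : q + 2 < K + 1), if_pos rfl]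
    have haccsucc : (List.range s ++ [s]).foldl (fun acc p => max acc (min (pvFA A (i - 1 - p) (q + 1))
              (pvPref A (i + 1) - pvPref A (i - 1 - p + 1)))) 0 =
        max ((List.range s).foldl (fun acc p => max acc (min (pvFA A (i - 1 - p) (q + 1))
              (pvPref A (i + 1) - pvPref A (i - 1 - p + 1)))) 0)
          (min (pvFA A t (q + 1)) (pvPref A (i + 1) - pvPref A (t + 1))) := by
      rw [List.foldl_append, List.foldl_cons, List.foldl_nil]
    simp only [hcast, hcol1, hcol2, PySem.List.pyGetD_natCast, PySem.List.pySetD_natCast,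
      eSi, eSt, eFt, eFi, eRowT, eCell]
    by_cases hbr : min (pvFA A t (q + 1)) (pvPref A (i + 1) - pvPref A (t + 1)) >
        (List.range s).foldl (fun acc p => max acc (min (pvFA A (i - 1 - p) (q + 1))
              (pvPref A (i + 1) - pvPref A (i - 1 - p + 1)))) 0
    · rw [if_pos hbr, pvMapRange_set _ _ _ _ (by omega : q + 2 < K + 1),
        pvMapRange_set _ _ _ _ hiN]
      apply List.map_congr_left
      intro r hr
      rcases eq_or_ne r i with h | h
      · subst h
        rw [if_pos rfl, if_neg (lt_irrefl r), if_pos rfl]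
        apply List.map_congr_left
        intro jj hjj
        rcases eq_or_ne jj (q + 2) with hj | hj
        · rw [if_pos hj, hj, if_pos rfl, haccsucc]
          omega
        · simp [hj]
      · rw [if_neg h]
        by_cases hlt : r < i
        · rw [if_pos hlt, if_pos hlt]
        · rw [if_neg hlt, if_neg hlt, if_neg h, if_neg h]
    · rw [if_neg hbr]
      apply List.map_congr_left
      intro r hr
      rcases eq_or_ne r i with h | h
      · subst h
        rw [if_neg (lt_irrefl r), if_pos rfl, if_neg (lt_irrefl r), if_pos rfl]
        apply List.map_congr_left
        intro jj hjj
        rcases eq_or_ne jj (q + 2) with hj | hj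
        · rw [if_pos hj, if_pos hj, haccsucc]
          omega
        · simp [hj]
      · by_cases hlt : r < i
        · rw [if_pos hlt, if_pos hlt]
        · rw [if_neg hlt, if_neg hlt, if_neg h, if_neg h]

-- A's j-loop completes row i of the table
lemma pvJstep (A : List Int) (k : Int) (hk : 1 ≤ k) (i : ℕ) (hi1 : 1 ≤ i) (hiN : i < A.length) :
    (PySem.List.pyRange 2 (k + 1) 1).foldl
      (fun F j =>
        if (i : Int) + 1 ≥ j then
          (PySem.List.pyRange 1 ((i : Int) + 1) 1).foldl
            (fun F p =>
              let tempVal := PySem.List.pyGetD ((List.range A.length).map (fun r => pvPref A (r + 1))) (i : Int) 0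
                - PySem.List.pyGetD ((List.range A.length).map (fun r => pvPref A (r + 1))) ((i : Int) - p) 0
              let tempMin := min (PySem.List.pyGetD (PySem.List.pyGetD F ((i : Int) - p) []) (j - 1) 0) tempVal
              if tempMin > PySem.List.pyGetD (PySem.List.pyGetD F (i : Int) []) j 0 then
                PySem.List.pySetD F (i : Int) (PySem.List.pySetD (PySem.List.pyGetD F (i : Int) []) j tempMin)
              else F)
            F
        else F)
      ((List.range A.length).map (fun r => if r < i then pvRowFin A k.toNat r else pvRow0 A k.toNat r))
    = (List.range A.length).map (fun r => if r < i + 1 then pvRowFin A k.toNat r else pvRow0 A k.toNat r) := by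
  set K := k.toNat with hKdef
  have hK1 : 1 ≤ K := by omega
  have hkK : k = (K : Int) := by omega
  rw [hkK, PySem.List.pyRange_one 2 ((K : Int) + 1),
    show (((K : Int) + 1) - 2).toNat = K - 1 by omega, List.foldl_map]
  have main : ∀ m, m ≤ K - 1 →
      (List.range m).foldl
        (fun F (q : ℕ) =>
          if (i : Int) + 1 ≥ 2 + (q : Int) then
            (PySem.List.pyRange 1 ((i : Int) + 1) 1).foldl
              (fun F p =>
                let tempVal := PySem.List.pyGetD ((List.range A.length).map (fun r => pvPref A (r + 1))) (i : Int) 0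
                  - PySem.List.pyGetD ((List.range A.length).map (fun r => pvPref A (r + 1))) ((i : Int) - p) 0
                let tempMin := min (PySem.List.pyGetD (PySem.List.pyGetD F ((i : Int) - p) []) ((2 + (q : Int)) - 1) 0) tempVal
                if tempMin > PySem.List.pyGetD (PySem.List.pyGetD F (i : Int) []) (2 + (q : Int)) 0 then
                  PySem.List.pySetD F (i : Int) (PySem.List.pySetD (PySem.List.pyGetD F (i : Int) []) (2 + (q : Int)) tempMin)
                else F)
              F
          else F)
        ((List.range A.length).map (fun r => if r < i then pvRowFin A K r else pvRow0 A K r))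
      = (List.range A.length).map (fun r => if r < i then pvRowFin A K r
          else if r = i then pvRowMid A K i (m + 1) else pvRow0 A K r) := by
    intro m
    induction m with
    | zero =>
      intro _
      rw [List.range_zero, List.foldl_nil]
      apply List.map_congr_left
      intro r hr
      rcases eq_or_ne r i with h | h
      · subst h
        rw [if_neg (lt_irrefl r), if_neg (lt_irrefl r), if_pos rfl, pvRow0_eq A K r hK1]
      · by_cases hlt : r < i
        · rw [if_pos hlt, if_pos hlt]
        · rw [if_neg hlt, if_neg hlt, if_neg h]
    | succ m ihm =>
      intro hm
      rw [List.range_succ (n := m), List.foldl_append, ihm (by omega), List.foldl_cons,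
        List.foldl_nil]
      by_cases hg : m + 2 ≤ i + 1
      · rw [if_pos (by omega : (i : Int) + 1 ≥ 2 + (m : Int))]
        rw [PySem.List.pyRange_one 1 ((i : Int) + 1),
          show (((i : Int) + 1) - 1).toNat = i by omega, List.foldl_map]
        have hstart : ((List.range A.length).map (fun r => if r < i then pvRowFin A K r
            else if r = i then pvRowMid A K i (m + 1) else pvRow0 A K r))
            = ((List.range A.length).map (fun r => if r < i then pvRowFin A K r
            else if r = i then
              (List.range (K + 1)).map (fun jj => if jj = m + 2 then 0
                else if jj ≤ m + 1 then pvFA A i jj else 0)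
            else pvRow0 A K r)) := by
          apply List.map_congr_left
          intro r hr
          rcases eq_or_ne r i with h | h
          · subst h
            rw [if_neg (lt_irrefl r), if_neg (lt_irrefl r), if_pos rfl, if_pos rfl, pvRowMid]
            apply List.map_congr_left
            intro jj hjj
            rcases eq_or_ne jj (m + 2) with hj | hj
            · rw [if_pos hj, if_neg (by omega : ¬ jj ≤ m + 1)]
            · rw [if_neg hj]
          · by_cases hlt : r < i
            · rw [if_pos hlt, if_pos hlt]
            · rw [if_neg hlt, if_neg hlt, if_neg h, if_neg h]
        rw [hstart, pvPfoldA A K i m (by omega) hi1 hiN i (le_refl i)]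
        have hacc : (List.range i).foldl (fun acc p => max acc (min (pvFA A (i - 1 - p) (m + 1))
              (pvPref A (i + 1) - pvPref A (i - 1 - p + 1)))) 0 = pvFA A i (m + 2) := by
          rw [pvFA, if_pos (by omega : m + 2 ≤ i + 1)]
        rw [hacc]
        apply List.map_congr_left
        intro r hr
        rcases eq_or_ne r i with h | h
        · subst h
          rw [if_neg (lt_irrefl r), if_neg (lt_irrefl r), if_pos rfl, if_pos rfl, pvRowMid]
          apply List.map_congr_left
          intro jj hjj
          rcases eq_or_ne jj (m + 2) with hj | hj
          · rw [if_pos hj, hj, if_pos (by omega : m + 2 ≤ m + 1 + 1)]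
          · rw [if_neg hj]
            by_cases hle : jj ≤ m + 1
            · rw [if_pos hle, if_pos (by omega : jj ≤ m + 1 + 1)]
            · rw [if_neg hle, if_neg (by omega : ¬ jj ≤ m + 1 + 1)]
        · by_cases hlt : r < i
          · rw [if_pos hlt, if_pos hlt]
          · rw [if_neg hlt, if_neg hlt, if_neg h, if_neg h]
      · rw [if_neg (by omega : ¬ (i : Int) + 1 ≥ 2 + (m : Int))]
        apply List.map_congr_left
        intro r hr
        rcases eq_or_ne r i with h | h
        · subst h
          rw [if_neg (lt_irrefl r), if_neg (lt_irrefl r), if_pos rfl, if_pos rfl, pvRowMid, pvRowMid]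
          apply List.map_congr_left
          intro jj hjj
          rcases eq_or_ne jj (m + 2) with hj | hj
          · rw [if_neg (by omega : ¬ jj ≤ m + 1), if_pos (by omega : jj ≤ m + 1 + 1), hj,
              pvFA_eq_zero_of_guard A r (m + 2) (by omega) (by omega)]
          · by_cases hle : jj ≤ m + 1
            · rw [if_pos hle, if_pos (by omega : jj ≤ m + 1 + 1)]
            · rw [if_neg hle, if_neg (by omega : ¬ jj ≤ m + 1 + 1)]
        · by_cases hlt : r < i
          · rw [if_pos hlt, if_pos hlt]
          · rw [if_neg hlt, if_neg hlt, if_neg h, if_neg h]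
  rw [main (K - 1) (le_refl (K - 1))]
  apply List.map_congr_left
  intro r hr
  rcases eq_or_ne r i with h | h
  · subst h
    rw [if_neg (lt_irrefl r), if_pos rfl, if_pos (by omega : r < r + 1),
      show (K - 1) + 1 = K by omega, pvRowMid_last]
  · by_cases hlt : r < i
    · rw [if_pos hlt, if_pos (by omega : r < i + 1)]
    · rw [if_neg hlt, if_neg h, if_neg (by omega : ¬ r < i + 1)]

-- A's outer i-loop completes all rows
lemma pvPhase2 (A : List Int) (k : Int) (hk : 1 ≤ k) :
    ∀ m, m + 1 ≤ A.length →
    (List.range m).foldl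
      (fun F (t : ℕ) =>
        (PySem.List.pyRange 2 (k + 1) 1).foldl
          (fun F j =>
            if (1 + (t : Int)) + 1 ≥ j then
              (PySem.List.pyRange 1 ((1 + (t : Int)) + 1) 1).foldl
                (fun F p =>
                  let tempVal := PySem.List.pyGetD ((List.range A.length).map (fun r => pvPref A (r + 1))) (1 + (t : Int)) 0
                    - PySem.List.pyGetD ((List.range A.length).map (fun r => pvPref A (r + 1))) ((1 + (t : Int)) - p) 0
                  let tempMin := min (PySem.List.pyGetD (PySem.List.pyGetD F ((1 + (t : Int)) - p) []) (j - 1) 0) tempVal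
                  if tempMin > PySem.List.pyGetD (PySem.List.pyGetD F (1 + (t : Int)) []) j 0 then
                    PySem.List.pySetD F (1 + (t : Int)) (PySem.List.pySetD (PySem.List.pyGetD F (1 + (t : Int)) []) j tempMin)
                  else F)
                F
            else F)
          F)
      ((List.range A.length).map (fun r => pvRow0 A k.toNat r))
    = (List.range A.length).map (fun r => if r < m + 1 then pvRowFin A k.toNat r else pvRow0 A k.toNat r) := by
  intro m
  induction m with
  | zero =>
    intro h1
    rw [List.range_zero, List.foldl_nil]
    apply List.map_congr_left
    intro r hr
    by_cases h : r < 1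
    · rw [if_pos h, show r = 0 by omega, pvRowFin_zero A k.toNat (by omega)]
    · rw [if_neg h]
  | succ m ihm =>
    intro hm
    rw [List.range_succ (n := m), List.foldl_append, ihm (by omega), List.foldl_cons,
      List.foldl_nil]
    have hstep := pvJstep A k hk (m + 1) (by omega) (by omega)
    simp only [show ((m + 1 : ℕ) : Int) = 1 + (m : Int) by push_cast; ring] at hstep
    exact hstep

lemma pvPortA (A : List Int) (k : Int) (hA : A ≠ []) (hk : 1 ≤ k) :
    maximin A k = pvFA A (A.length - 1) k.toNat := by
  have hN : 1 ≤ A.length := List.length_pos_of_ne_nil hA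
  simp only [maximin, PySem.List.len_eq]
  simp only [PySem.List.pyRepeat_singleton, Int.toNat_natCast, PySem.List.pyRange_zero_nat,
    List.foldl_map, List.map_map, Function.comp_def]
  rw [show (k + 1).toNat = k.toNat + 1 by omega]
  rw [pvPhase1 A k hk A.length (le_refl A.length)]
  have hS : (List.range A.length).map (fun r => if r < A.length then pvPref A (r + 1) else 0)
      = (List.range A.length).map (fun r => pvPref A (r + 1)) := by
    apply List.map_congr_left
    intro r hr
    rw [if_pos (List.mem_range.mp hr)]
  have hF : (List.range A.length).map (fun r => if r < A.length then pvRow0 A k.toNat r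
        else List.replicate (k.toNat + 1) 0)
      = (List.range A.length).map (fun r => pvRow0 A k.toNat r) := by
    apply List.map_congr_left
    intro r hr
    rw [if_pos (List.mem_range.mp hr)]
  simp only [hS, hF]
  rw [PySem.List.pyRange_one 1 ((A.length : Int)),
    show (((A.length : Int)) - 1).toNat = A.length - 1 by omega, List.foldl_map]
  rw [pvPhase2 A k hk (A.length - 1) (by omega)]
  rw [show ((A.length : Int) - 1) = ((A.length - 1 : ℕ) : Int) by omega,
    PySem.List.pyGetD_natCast,
    PySem.List.getD_map_range _ _ _ _ (by omega : A.length - 1 < A.length),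
    if_pos (by omega : A.length - 1 < A.length - 1 + 1)]
  rw [show k = ((k.toNat : ℕ) : Int) by omega, PySem.List.pyGetD_natCast, pvRowFin]
  simp only [Int.toNat_natCast]
  rw [PySem.List.getD_map_range _ _ _ _ (by omega : k.toNat < k.toNat + 1)]


-- ---- upper bound for the binary search ----

lemma pvPos_nonneg (A : List Int) : 0 ≤ (A.filter (fun a => a > 0)).sum := by
  apply List.sum_nonneg
  intro a ha
  have := List.of_mem_filter ha
  simp at this
  omega

lemma pvPref_sub_le (A : List Int) :
    ∀ b a, a ≤ b → pvPref A b - pvPref A a ≤ (A.filter (fun a => a > 0)).sum := by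
  have hTake : ∀ b, ((A.take b).filter (fun a => a > 0)).sum ≤ (A.filter (fun a => a > 0)).sum := by
    intro b
    conv_rhs => rw [← List.take_append_drop b A]
    rw [List.filter_append, List.sum_append]
    have : 0 ≤ ((A.drop b).filter (fun a => a > 0)).sum := pvPos_nonneg _
    omega
  have main : ∀ b a, a ≤ b → pvPref A b - pvPref A a ≤ ((A.take b).filter (fun a => a > 0)).sum := by
    intro b
    induction b with
    | zero =>
      intro a ha
      rw [Nat.le_zero.mp ha]
      simp
    | succ b ih =>
      intro a ha
      rcases eq_or_ne a (b + 1) with h | h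
      · rw [h]
        have := pvPos_nonneg (A.take (b + 1))
        omega
      · have hab : a ≤ b := by omega
        by_cases hlen : b < A.length
        · have hstep := pvPref_succ A b hlen
          have hget : A.getD b 0 = A[b] := by
            rw [List.getD_eq_getElem?_getD, List.getElem?_eq_getElem hlen]
            rfl
          have htake : A.take (b + 1) = A.take b ++ [A[b]] := by
            rw [List.take_add_one, List.getElem?_eq_getElem hlen]
            rfl
          rw [htake, List.filter_append, List.sum_append]
          have hone : ([A[b]].filter (fun a => a > 0)).sum ≥ A[b] ∧
              0 ≤ ([A[b]].filter (fun a => a > 0)).sum := by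
            by_cases hp : A[b] > 0
            · simp [List.filter, hp]
              omega
            · constructor
              · simp only [List.filter]
                rw [show (decide (A[b] > 0)) = false by simpa using hp]
                simp
                omega
              · simp only [List.filter]
                rw [show (decide (A[b] > 0)) = false by simpa using hp]
                simp
          have := ih a hab
          omega
        · have hble : A.length ≤ b := by omega
          have h1 : A.take (b + 1) = A.take b := by
            rw [List.take_of_length_le hble, List.take_of_length_le (by omega)]
          have h2 : pvPref A (b + 1) = pvPref A b := by
            unfold pvPref
            rw [h1]
          rw [h1, h2]
          exact ih a hab
  intro b a hab
  exact le_trans (main b a hab) (hTake b)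

lemma pvFB_le_pos (A : List Int) :
    ∀ j i v, pvFB A i j = some v → v ≤ (A.filter (fun a => a > 0)).sum := by
  intro j
  match j with
  | 0 => intro i v h; simp [pvFB] at h
  | 1 =>
    intro i v h
    have h' : pvPref A (i + 1) = v := by simpa [pvFB] using h
    have hle := pvPref_sub_le A (i + 1) 0 (by omega)
    have h0 : pvPref A 0 = 0 := by simp [pvPref]
    rw [h0] at hle
    omega
  | (j' + 2) =>
    intro i v h
    rw [pvFB, ← List.foldl_map] at h
    rcases pvOfold_mem _ none v h with h' | h'
    · simp at h'
    · rcases List.mem_map.mp h' with ⟨t, htmem, hterm⟩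
      cases hw : pvFB A t (j' + 1) with
      | none => rw [hw] at hterm; simp at hterm
      | some w =>
        rw [hw] at hterm
        simp only [Option.map_some, Option.some.injEq] at hterm
        have ht := List.mem_range.mp htmem
        have hseg := pvPref_sub_le A (i + 1) (t + 1) (by omega : t + 1 ≤ i + 1)
        have : v ≤ pvPref A (i + 1) - pvPref A (t + 1) := by
          rw [← hterm]
          exact min_le_right _ _
        omega

-- ---- the binary search returns the greatest acceptable value ----

lemma pvBs_eq (P : List Int) (n k : Int) (v : Int) :
    ∀ (d : Nat) (lo hi : Int), (hi - lo).toNat ≤ d → lo ≤ v → v ≤ hi →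
      (∀ y, lo < y → y ≤ v → pvFeasB P n k y = true) →
      (∀ y, v < y → y ≤ hi → pvFeasB P n k y = false) →
      pvBsB P n k lo hi = v := by
  intro d
  induction d with
  | zero =>
    intro lo hi hd h1 h2 _ _
    rw [pvBsB, dif_neg (by omega : ¬ lo < hi)]
    omega
  | succ d ih =>
    intro lo hi hd h1 h2 hT hF
    by_cases hlt : lo < hi
    · obtain ⟨hm1, hm2⟩ := pvMidBounds lo hi hlt
      rw [pvBsB, dif_pos hlt]
      show (if pvFeasB P n k (PySem.Int.floordiv (lo + hi + 1) 2) then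
          pvBsB P n k (PySem.Int.floordiv (lo + hi + 1) 2) hi
        else pvBsB P n k lo (PySem.Int.floordiv (lo + hi + 1) 2 - 1)) = v
      by_cases hmv : PySem.Int.floordiv (lo + hi + 1) 2 ≤ v
      · rw [hT _ hm1 hmv, if_pos rfl]
        exact ih _ hi (by omega) hmv h2 (fun y hy1 hy2 => hT y (by omega) hy2)
          (fun y hy1 hy2 => hF y hy1 hy2)
      · rw [hF _ (by omega) hm2]
        rw [show (if (false : Bool) then pvBsB P n k (PySem.Int.floordiv (lo + hi + 1) 2) hi
            else pvBsB P n k lo (PySem.Int.floordiv (lo + hi + 1) 2 - 1))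
          = pvBsB P n k lo (PySem.Int.floordiv (lo + hi + 1) 2 - 1) from rfl]
        exact ih lo _ (by omega) h1 (by omega) (fun y hy1 hy2 => hT y hy1 hy2)
          (fun y hy1 hy2 => hF y hy1 (by omega))
    · rw [pvBsB, dif_neg hlt]
      omega

-- ===== VERDICT (by name: the statement is the Claim_ definition above) =====
theorem maximin_spec : Claim_equal_maximin := by
  intro A k _ hpre
  obtain ⟨hA, hk⟩ := hpre
  unfold Spec_maximin
  have hN : 1 ≤ A.length := List.length_pos_of_ne_nil hA
  by_cases hk1 : k = 1
  · subst hk1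
    rw [pvPortA A 1 hA (by omega)]
    have h1 : maximin_alt A 1 = A.sum := by
      simp [maximin_alt]
    rw [h1, show (1 : Int).toNat = 1 from rfl,
      show pvFA A (A.length - 1) 1 = pvPref A (A.length - 1 + 1) from by simp [pvFA],
      show A.length - 1 + 1 = A.length by omega]
    simp [pvPref]
  · have hk2 : 2 ≤ k := by omega
    rw [pvPortA A k hA hk, pvFA_eq_fB A k.toNat (A.length - 1) (by omega)]
    by_cases hkn : k > (A.length : Int)
    · have hnone : pvFB A (A.length - 1) k.toNat = none := by
        rw [pvFB_none_iff A k.toNat (A.length - 1) (by omega)]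
        omega
      have halt0 : maximin_alt A k = 0 := by
        simp only [maximin_alt, PySem.List.len_eq]
        rw [if_neg hk1, if_pos hkn]
      rw [halt0, hnone]
      rfl
    have halt : maximin_alt A k =
        pvBsB ((List.range (A.length + 1)).map (pvPref A)) (A.length : Int) k 0
          ((A.filter (fun a => a > 0)).sum) := by
      simp only [maximin_alt, PySem.List.len_eq]
      rw [if_neg hk1, if_neg hkn, pvPlist A]
    rw [halt]
    set v : Int := max 0 ((pvFB A (A.length - 1) k.toNat).getD 0) with hv
    have hvnn : 0 ≤ v := le_max_left _ _
    have hchar : ∀ y, pvFeasB ((List.range (A.length + 1)).map (pvPref A)) (A.length : Int) k y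
        = pvReach A y k.toNat A.length := fun y => pvFeas_char A k y (by omega)
    obtain ⟨m, hm⟩ : ∃ m, A.length = m + 1 := ⟨A.length - 1, by omega⟩
    have hm1 : A.length - 1 = m := by omega
    have hreach : ∀ y, pvReach A y k.toNat A.length
        = (match pvFB A m k.toNat with
           | none => false
           | some w => decide (y ≤ w)) := by
      intro y
      rw [hm]
      rfl
    have hvle : v ≤ (A.filter (fun a => a > 0)).sum := by
      have hpos := pvPos_nonneg A
      cases hfb : pvFB A (A.length - 1) k.toNat with
      | none => rw [hv, hfb]; simpa using hpos
      | some w =>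
        have := pvFB_le_pos A k.toNat (A.length - 1) w hfb
        rw [hv, hfb]
        simp only [Option.getD_some]
        omega
    symm
    apply pvBs_eq _ _ _ v ((A.filter (fun a => a > 0)).sum - 0).toNat 0
      ((A.filter (fun a => a > 0)).sum) (by omega) hvnn hvle
    · intro y hy1 hy2
      rw [hchar y, hreach y]
      cases hfb : pvFB A (A.length - 1) k.toNat with
      | none =>
        rw [hv, hfb] at hy2
        simp at hy2
        omega
      | some w =>
        rw [hm1] at hfb
        rw [hfb]
        simp only [decide_eq_true_eq]
        rw [hv, hm1, hfb] at hy2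
        simp only [Option.getD_some] at hy2
        omega
    · intro y hy1 hy2
      rw [hchar y, hreach y]
      cases hfb : pvFB A m k.toNat with
      | none => rfl
      | some w =>
        simp only [decide_eq_false_iff_not]
        rw [hv, hm1, hfb] at hy1
        simp only [Option.getD_some] at hy1
        omega
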